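-- pv_equiv track=rewrite | github.com/RedTako/anagram-finder | anagram.py | match_words
-- ===== SOURCE A (Python) =====
-- def match_words(word_list: set, permutations: list, match_substring: bool = False):
--     first_word = ""
--     matched_words = set()
--     for word in permutations:
--         word_str = str().join(word).lower()
--         if first_word == "":
--             first_word = word_str
--         if word_str in word_list:
--             matched_words.add(word_str)
--
--         if match_substring:
--             for words in word_list:
--                 if words in word_str:
--                     matched_words.add(words)
--
--     if(len(matched_words) > 0):
--         return matched_words
--     raise RuntimeError("word not found in list: {}".format(str().join(first_word)))
-- ===== SOURCE B (Python) =====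
-- def match_words(word_list, permutations, match_substring=False):
--     first_word = ""
--     word_set = set(word_list)
--     lengths = {len(w) for w in word_list}
--     matched_words = set()
--     for word in permutations:
--         word_str = "".join(word).lower()
--         if first_word == "":
--             first_word = word_str
--         if word_str in word_set:
--             matched_words.add(word_str)
--         if match_substring:
--             # enumerate the substrings of word_str whose length occurs in the
--             # dictionary and look each up in the hash set, instead of testing
--             # every dictionary word for containment
--             n = len(word_str)
--             found = set()
--             for i in range(n + 1):
--                 for length in lengths:
--                     if i + length <= n:
--                         piece = word_str[i:i + length]
--                         if piece in word_set:
--                             found.add(piece)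
--             for w in word_list:
--                 if w in found:
--                     matched_words.add(w)
--     if len(matched_words) > 0:
--         return matched_words
--     raise RuntimeError("word not found in list: {}".format(first_word))
-- ===== Notes on version B (the rewrite author's own statement) =====
-- stated objective: alternative
-- what changed: B replaces A's per-permutation containment scan of every dictionary word with substring enumeration: it hashes word_list into a set, collects the distinct lengths occurring in it, and for each permutation looks up every substring of a dictionary length in the hash set, emitting the hits in word_list order.
import Mathlib
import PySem

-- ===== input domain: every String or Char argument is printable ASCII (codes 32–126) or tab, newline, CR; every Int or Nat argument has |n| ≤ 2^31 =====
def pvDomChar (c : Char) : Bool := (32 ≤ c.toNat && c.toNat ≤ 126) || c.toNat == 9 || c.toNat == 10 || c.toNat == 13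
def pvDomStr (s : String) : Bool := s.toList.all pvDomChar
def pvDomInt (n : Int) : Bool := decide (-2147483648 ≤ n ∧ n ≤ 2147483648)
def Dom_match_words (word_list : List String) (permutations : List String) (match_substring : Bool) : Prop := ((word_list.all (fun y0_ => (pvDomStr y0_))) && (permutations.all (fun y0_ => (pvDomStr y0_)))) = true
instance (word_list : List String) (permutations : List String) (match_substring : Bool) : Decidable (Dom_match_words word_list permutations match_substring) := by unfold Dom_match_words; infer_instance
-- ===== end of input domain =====

-- B replaces A's per-permutation scan of every dictionary word (substring containment test each)
-- with enumeration of the permutation's substrings of dictionary lengths, looked up in a hash set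
-- (objective: alternative algorithm, same result, emitted in the same order).

-- ===== PORT A =====
-- first_word only feeds the message of the exception A raises when nothing matched;
-- that path is excluded by Pre_match_words, so first_word is not carried in the port.
def match_words (word_list : List String) (permutations : List String) (match_substring : Bool) : List String :=
  permutations.foldl (fun matched_words word =>
    let word_str := PySem.Str.lower word
    let matched_words :=
      if word_list.contains word_str then PySem.Set.add matched_words word_str else matched_words
    if match_substring then
      word_list.foldl (fun m words =>
        if PySem.Str.isIn words word_str then PySem.Set.add m words else m) matched_words
    else matched_words) PySem.Set.empty

-- ===== PORT B =====
def match_words_alt (word_list : List String) (permutations : List String) (match_substring : Bool) : List String :=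
  let word_set := PySem.Set.ofList word_list
  let lengths : List Int := PySem.Set.ofList (word_list.map (fun w => PySem.Str.len w))
  permutations.foldl (fun matched_words word =>
    let word_str := PySem.Str.lower word
    let matched_words :=
      if PySem.Set.contains word_set word_str then PySem.Set.add matched_words word_str else matched_words
    if match_substring then
      let n : Int := PySem.Str.len word_str
      let found := (PySem.List.pyRange 0 (n + 1) 1).foldl (fun f i =>
        lengths.foldl (fun f length =>
          if i + length ≤ n then
            let piece := PySem.Str.slice word_str (some i) (some (i + length))
            if PySem.Set.contains word_set piece then PySem.Set.add f piece else f
          else f) f) PySem.Set.empty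
      word_list.foldl (fun m w =>
        if PySem.Set.contains found w then PySem.Set.add m w else m) matched_words
    else matched_words) PySem.Set.empty

-- ===== PRECONDITION & SPEC =====
-- Pre_ excludes exactly the inputs on which A raises RuntimeError (no permutation,
-- lowered, is in word_list or — with match_substring — has a dictionary word as substring).
def Pre_match_words (word_list : List String) (permutations : List String) (match_substring : Bool) : Prop :=
  ∃ p ∈ permutations, (PySem.Str.lower p) ∈ word_list ∨
    (match_substring = true ∧ ∃ w ∈ word_list, PySem.Str.isIn w (PySem.Str.lower p) = true)
instance (word_list : List String) (permutations : List String) (match_substring : Bool) : Decidable (Pre_match_words word_list permutations match_substring) := by unfold Pre_match_words; infer_instance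
def pvWitness_match_words : List String × List String × Bool := (["ab"], ["AB"], false)
def Spec_match_words (word_list : List String) (permutations : List String) (match_substring : Bool) (out : List String) : Prop := out = match_words_alt word_list permutations match_substring
instance (word_list : List String) (permutations : List String) (match_substring : Bool) (out : List String) : Decidable (Spec_match_words word_list permutations match_substring out) := by unfold Spec_match_words; infer_instance

-- ===== CLAIM (what is proved, stated in full; the proofs are below) =====
def Claim_equal_match_words : Prop := ∀ (word_list : List String) (permutations : List String) (match_substring : Bool), Dom_match_words word_list permutations match_substring → Pre_match_words word_list permutations match_substring → Spec_match_words word_list permutations match_substring (match_words word_list permutations match_substring)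

-- ===== LEMMAS AND PROOFS =====

-- membership through a fold whose step either leaves the set or adds something
theorem mem_foldl_of_step {α β : Type} (l : List α) (F : List β → α → List β) (Q : α → β → Prop)
    (h : ∀ s i x, x ∈ F s i ↔ x ∈ s ∨ Q i x) (s0 : List β) (x : β) :
    x ∈ l.foldl F s0 ↔ x ∈ s0 ∨ ∃ i ∈ l, Q i x := by
  induction l generalizing s0 with
  | nil => simp
  | cons a t ih =>
    simp only [List.foldl_cons, ih, h, List.mem_cons]
    constructor
    · rintro ((hs | hq) | ⟨i, hi, hQ⟩)
      · exact Or.inl hs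
      · exact Or.inr ⟨a, Or.inl rfl, hq⟩
      · exact Or.inr ⟨i, Or.inr hi, hQ⟩
    · rintro (hs | ⟨i, (rfl | hi), hQ⟩)
      · exact Or.inl (Or.inl hs)
      · exact Or.inl (Or.inr hQ)
      · exact Or.inr ⟨i, hi, hQ⟩


theorem contains_found (wl : List String) (ws w : String) (hw : w ∈ wl) :
    PySem.Set.contains
      ((PySem.List.pyRange 0 (PySem.Str.len ws + 1) 1).foldl (fun f i =>
        (PySem.Set.ofList (wl.map (fun w => PySem.Str.len w))).foldl (fun f length =>
          if i + length ≤ PySem.Str.len ws then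
            let piece := PySem.Str.slice ws (some i) (some (i + length))
            if PySem.Set.contains (PySem.Set.ofList wl) piece then PySem.Set.add f piece else f
          else f) f) PySem.Set.empty) w
    = PySem.Str.isIn w ws := by
  have hmem : ∀ x, (x ∈ (PySem.List.pyRange 0 (PySem.Str.len ws + 1) 1).foldl (fun f i =>
        (PySem.Set.ofList (wl.map (fun w => PySem.Str.len w))).foldl (fun f length =>
          if i + length ≤ PySem.Str.len ws then
            let piece := PySem.Str.slice ws (some i) (some (i + length))
            if PySem.Set.contains (PySem.Set.ofList wl) piece then PySem.Set.add f piece else f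
          else f) f) PySem.Set.empty) ↔
      ∃ i ∈ PySem.List.pyRange 0 (PySem.Str.len ws + 1) 1,
        ∃ L ∈ PySem.Set.ofList (wl.map (fun w => PySem.Str.len w)),
          i + L ≤ PySem.Str.len ws ∧
          PySem.Set.contains (PySem.Set.ofList wl) (PySem.Str.slice ws (some i) (some (i + L))) = true ∧
          PySem.Str.slice ws (some i) (some (i + L)) = x := by
    intro x
    rw [mem_foldl_of_step _ _
      (fun i x => ∃ L ∈ PySem.Set.ofList (wl.map (fun w => PySem.Str.len w)),
          i + L ≤ PySem.Str.len ws ∧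
          PySem.Set.contains (PySem.Set.ofList wl) (PySem.Str.slice ws (some i) (some (i + L))) = true ∧
          PySem.Str.slice ws (some i) (some (i + L)) = x)]
    · simp [PySem.Set.empty]
    · intro s i y
      rw [mem_foldl_of_step _ _
        (fun L y => i + L ≤ PySem.Str.len ws ∧
          PySem.Set.contains (PySem.Set.ofList wl) (PySem.Str.slice ws (some i) (some (i + L))) = true ∧
          PySem.Str.slice ws (some i) (some (i + L)) = y)]
      intro s' L z
      by_cases h1 : i + L ≤ PySem.Str.len ws
      · by_cases hc : PySem.Set.contains (PySem.Set.ofList wl) (PySem.Str.slice ws (some i) (some (i + L))) = true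
        · simp only [h1, if_pos, hc]
          rw [PySem.Set.mem_add]
          tauto
        · simp only [h1, if_pos]
          rw [if_neg (by simpa using hc)]
          tauto
      · rw [if_neg h1]
        tauto
  have key : PySem.Str.isIn w ws = true ↔
      (w ∈ (PySem.List.pyRange 0 (PySem.Str.len ws + 1) 1).foldl (fun f i =>
        (PySem.Set.ofList (wl.map (fun w => PySem.Str.len w))).foldl (fun f length =>
          if i + length ≤ PySem.Str.len ws then
            let piece := PySem.Str.slice ws (some i) (some (i + length))
            if PySem.Set.contains (PySem.Set.ofList wl) piece then PySem.Set.add f piece else f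
          else f) f) PySem.Set.empty) := by
    rw [hmem, PySem.Str.isIn_iff_infix w ws]
    constructor
    · intro hinf
      have hIn : PySem.Chars.isIn w.toList ws.toList = true := by
        rw [PySem.Chars.isIn_iff_infix]; exact hinf
      obtain ⟨j, hj⟩ := (PySem.Chars.exists_prefix_drop_iff_isIn w.toList ws.toList).mpr hIn
      set m := ws.toList.length with hm
      set i := min j m with hidef
      have hpre : w.toList <+: List.drop i ws.toList := by
        rcases Nat.lt_or_ge m j with hjm | hjm
        · have hnil : List.drop j ws.toList = [] := List.drop_eq_nil_of_le (by omega)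
          have : w.toList = [] := List.prefix_nil.mp (hnil ▸ hj)
          simp [this]
        · simpa [hidef, min_eq_left hjm] using hj
      have him : i ≤ m := min_le_right _ _
      set b := w.toList.length with hbdef
      have hlen : b ≤ m - i := by
        have := hpre.length_le
        simpa [List.length_drop] using this
      have hslice : PySem.Str.slice ws (some (i:Int)) (some ((i:Int) + (b:Int))) = w := by
        apply String.toList_inj.mp
        have heq : (PySem.Str.slice ws (some (i:Int)) (some ((i:Int) + (b:Int)))).toList
            = (ws.toList.drop i).take b := by simp [PySem.List.slice_natCast_add]
        rw [heq, ← List.prefix_iff_eq_take.mp hpre]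
      have hlenws : PySem.Str.len ws = (m : Int) := by simp [hm]
      refine ⟨(i:Int), ?_, (b:Int), ?_, ?_, ?_, ?_⟩
      · rw [PySem.List.mem_pyRange_one]
        omega
      · rw [PySem.Set.mem_ofList]
        simp only [List.mem_map]
        exact ⟨w, hw, by simp [hbdef]⟩
      · omega
      · rw [hslice, PySem.Set.contains_iff, PySem.Set.mem_ofList]
        exact hw
      · exact hslice
    · rintro ⟨i, hi, L, hL, hle, _, hsl⟩
      rw [PySem.List.mem_pyRange_one] at hi
      rw [PySem.Set.mem_ofList] at hL
      obtain ⟨w', hw', hlw'⟩ := List.mem_map.mp hL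
      have hL0 : (0:Int) ≤ L := by rw [← hlw']; simp
      obtain ⟨a, rfl⟩ : ∃ a : Nat, i = (a : Int) := ⟨i.toNat, (Int.toNat_of_nonneg hi.1).symm⟩
      obtain ⟨b, rfl⟩ : ∃ b : Nat, L = (b : Int) := ⟨L.toNat, (Int.toNat_of_nonneg hL0).symm⟩
      have heq : w.toList = (ws.toList.drop a).take b := by
        rw [← hsl]
        simp [PySem.List.slice_natCast_add]
      rw [heq]
      exact ((List.take_prefix b (ws.toList.drop a)).isInfix).trans (List.drop_suffix a ws.toList).isInfix
  cases hA : PySem.Str.isIn w ws with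
  | true => rw [PySem.Set.contains_iff]; exact key.mp hA
  | false =>
    rw [← Bool.not_eq_true, PySem.Set.contains_iff]
    intro hmemw
    have : PySem.Str.isIn w ws = true := key.mpr hmemw
    rw [hA] at this
    exact Bool.false_ne_true this

theorem contains_ofList_eq (wl : List String) (ws : String) :
    PySem.Set.contains (PySem.Set.ofList wl) ws = wl.contains ws := by
  by_cases h : ws ∈ wl <;> simp [PySem.Set.mem_ofList, h]

theorem match_words_eq (wl ps : List String) (ms : Bool) :
    match_words wl ps ms = match_words_alt wl ps ms := by
  unfold match_words match_words_alt
  simp only []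
  apply PySem.List.foldl_congr_mem
  intro acc word _
  rw [← contains_ofList_eq wl (PySem.Str.lower word)]
  cases ms with
  | false => simp
  | true =>
    simp only [if_true]
    apply PySem.List.foldl_congr_mem
    intro m w hwmem
    rw [contains_found wl (PySem.Str.lower word) w hwmem]

-- ===== VERDICT (by name: the statement is the Claim_ definition above) =====
theorem match_words_spec : Claim_equal_match_words := by
  intro word_list permutations match_substring _ _
  unfold Spec_match_words
  exact match_words_eq word_list permutations match_substring
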